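-- pv_equiv track=rewrite | github.com/itrummer/dbz | libraries/row_lists.py | group_by_max
-- ===== SOURCE A (Python) =====
-- def group_by_max(table, agg_column, group_columns):
--     """ Calculate max for each value combination in group columns.
--
--     Args:
--         table: a list of rows where each row is a list.
--         agg_column: index of column for which to calculate max.
--         group_columns: indexes of columns to group by.
--
--     Returns:
--         group columns and associated max: a list of rows where each row is a list.
--     """
--     # create a dictionary with group columns as keys and max as values
--     max_dict = {}
--     for row in table:
--         # create a tuple of group columns
--         group_columns_tuple = tuple([row[i] for i in group_columns])
--         # if group columns tuple is not in dictionary, add it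
--         if group_columns_tuple not in max_dict:
--             max_dict[group_columns_tuple] = row[agg_column]
--         # if group columns tuple is in dictionary, update max if necessary
--         elif row[agg_column] > max_dict[group_columns_tuple]:
--             max_dict[group_columns_tuple] = row[agg_column]
--     # create a list of rows from dictionary
--     max_list = []
--     for key in max_dict:
--         max_list.append(list(key) + [max_dict[key]])
--     return max_list
-- ===== SOURCE B (Python) =====
-- def group_by_max(table, agg_column, group_columns):
--     """ Calculate max for each value combination in group columns. """
--     # first pass: collect every group's agg values in first-appearance order
--     groups = {}
--     for row in table:
--         key = tuple(row[i] for i in group_columns)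
--         groups.setdefault(key, []).append(row[agg_column])
--     # second pass: one output row per group
--     return [list(key) + [max(vals)] for key, vals in groups.items()]
-- ===== Notes on version B (the rewrite author's own statement) =====
-- stated objective: alternative
-- what changed: B collects each group's aggregate values into per-group lists in one pass (dict of lists via setdefault) and computes max(vals) per group in a separate emission pass, instead of A's single pass that maintains a running max with a conditional compare-and-update.
import Mathlib
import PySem

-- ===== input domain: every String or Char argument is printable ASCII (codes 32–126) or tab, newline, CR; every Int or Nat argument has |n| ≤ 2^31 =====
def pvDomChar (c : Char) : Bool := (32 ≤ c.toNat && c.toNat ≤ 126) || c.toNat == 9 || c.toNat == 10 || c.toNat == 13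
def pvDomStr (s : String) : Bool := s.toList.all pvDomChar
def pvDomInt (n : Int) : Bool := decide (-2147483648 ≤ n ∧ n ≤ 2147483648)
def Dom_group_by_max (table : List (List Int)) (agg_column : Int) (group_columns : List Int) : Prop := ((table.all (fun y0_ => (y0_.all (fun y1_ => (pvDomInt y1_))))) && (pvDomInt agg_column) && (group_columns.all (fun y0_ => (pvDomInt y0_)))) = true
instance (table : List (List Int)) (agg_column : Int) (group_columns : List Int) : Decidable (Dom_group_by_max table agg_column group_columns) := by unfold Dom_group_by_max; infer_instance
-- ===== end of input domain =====

-- B groups values into per-key lists in one pass and takes max per group in a second pass,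
-- instead of A's running-max compare-and-update; return values proved equal on Pre_.


-- ===== PORT A =====
def group_by_max (table : List (List Int)) (agg_column : Int) (group_columns : List Int) : List (List Int) :=
  let max_dict : PySem.Dict (List Int) Int :=
    table.foldl (fun d row =>
      let group_columns_tuple := group_columns.map (fun i => PySem.List.pyGetD row i 0)
      match d.get? group_columns_tuple with
      | none => d.insert group_columns_tuple (PySem.List.pyGetD row agg_column 0)
      | some m =>
          if PySem.List.pyGetD row agg_column 0 > m then
            d.insert group_columns_tuple (PySem.List.pyGetD row agg_column 0)
          else d)
      PySem.Dict.empty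
  max_dict.keys.foldl (fun max_list key => max_list ++ [key ++ [max_dict.getD key 0]]) []

-- ===== PORT B =====
def group_by_max_alt (table : List (List Int)) (agg_column : Int) (group_columns : List Int) : List (List Int) :=
  let groups : PySem.Dict (List Int) (List Int) :=
    table.foldl (fun d row =>
      d.modify (group_columns.map (fun i => PySem.List.pyGetD row i 0)) []
        (fun vals => vals ++ [PySem.List.pyGetD row agg_column 0]))
      PySem.Dict.empty
  groups.items.map (fun p => p.1 ++ [(PySem.List.max? p.2 (fun y => y)).getD 0])

-- ===== PRECONDITION & SPEC =====
-- Pre_ excludes exactly the inputs where Python A raises IndexError: some row indexed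
-- out of range by agg_column or by a group column.
def Pre_group_by_max (table : List (List Int)) (agg_column : Int) (group_columns : List Int) : Prop :=
  ∀ row ∈ table, PySem.Raise.InRange row.length agg_column ∧
    ∀ i ∈ group_columns, PySem.Raise.InRange row.length i
instance (table : List (List Int)) (agg_column : Int) (group_columns : List Int) : Decidable (Pre_group_by_max table agg_column group_columns) := by unfold Pre_group_by_max; infer_instance
def pvWitness_group_by_max : List (List Int) × Int × List Int := ([[1, 2], [1, 3], [2, 5]], 1, [0])

def Spec_group_by_max (table : List (List Int)) (agg_column : Int) (group_columns : List Int) (out : List (List Int)) : Prop := out = group_by_max_alt table agg_column group_columns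
instance (table : List (List Int)) (agg_column : Int) (group_columns : List Int) (out : List (List Int)) : Decidable (Spec_group_by_max table agg_column group_columns out) := by unfold Spec_group_by_max; infer_instance

-- ===== CLAIM (what is proved, stated in full; the proofs are below) =====
def Claim_equal_group_by_max : Prop := ∀ (table : List (List Int)) (agg_column : Int) (group_columns : List Int), Dom_group_by_max table agg_column group_columns → Pre_group_by_max table agg_column group_columns → Spec_group_by_max table agg_column group_columns (group_by_max table agg_column group_columns)

-- ===== LEMMAS AND PROOFS =====

def pvKeyOf (group_columns : List Int) (row : List Int) : List Int :=
  group_columns.map (fun i => PySem.List.pyGetD row i 0)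
def pvVOf (agg_column : Int) (row : List Int) : Int := PySem.List.pyGetD row agg_column 0
def pvVals (agg_column : Int) (group_columns : List Int) (rows : List (List Int)) (k : List Int) : List Int :=
  (rows.filter (fun r => pvKeyOf group_columns r == k)).map (pvVOf agg_column)
def pvStepA (agg_column : Int) (group_columns : List Int) (d : PySem.Dict (List Int) Int) (row : List Int) : PySem.Dict (List Int) Int :=
  match d.get? (pvKeyOf group_columns row) with
  | none => d.insert (pvKeyOf group_columns row) (pvVOf agg_column row)
  | some m => if pvVOf agg_column row > m then d.insert (pvKeyOf group_columns row) (pvVOf agg_column row) else d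
lemma pvVals_append (agg gcs : _) (rows : List (List Int)) (r k : List Int) :
    pvVals agg gcs (rows ++ [r]) k
      = pvVals agg gcs rows k ++ (if pvKeyOf gcs r == k then [pvVOf agg r] else []) := by
  simp only [pvVals, List.filter_append, List.map_append]
  congr 1
  by_cases h : pvKeyOf gcs r == k <;> simp [List.filter, h]
lemma pvMem_iff_vals_ne_nil (agg gcs : _) (rows : List (List Int)) (k : List Int) :
    k ∈ rows.map (pvKeyOf gcs) ↔ pvVals agg gcs rows k ≠ [] := by
  simp [pvVals, List.filter_eq_nil_iff]

lemma pvMax?_append_singleton (vs : List Int) (v : Int) :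
    PySem.List.max? (vs ++ [v]) (fun y => y)
      = some (match PySem.List.max? vs (fun y => y) with | none => v | some m => max m v) := by
  cases vs with
  | nil => simp [PySem.List.max?]
  | cons x t =>
      rw [List.cons_append, PySem.List.max?_id_cons, PySem.List.max?_id_cons]
      simp [List.foldl_append]

lemma pvRunA_char (agg gcs : _) (rows : List (List Int)) :
    (rows.foldl (pvStepA agg gcs) PySem.Dict.empty).keys = PySem.Set.ofList (rows.map (pvKeyOf gcs)) ∧
    ∀ k, (rows.foldl (pvStepA agg gcs) PySem.Dict.empty).get? k
        = PySem.List.max? (pvVals agg gcs rows k) (fun y => y) := by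
  induction rows using List.reverseRecOn with
  | nil => simp [pvVals, PySem.List.max?]
  | append_singleton rows r ih =>
      obtain ⟨hkeys, hget⟩ := ih
      rw [List.foldl_append, List.foldl_cons, List.foldl_nil]
      set D := rows.foldl (pvStepA agg gcs) PySem.Dict.empty with hD
      constructor
      · -- keys
        simp only [List.map_append, List.map_cons, List.map_nil, PySem.Set.ofList_append_singleton]
        rw [← hkeys]
        by_cases hmem : pvKeyOf gcs r ∈ D.keys
        · have hc : D.contains (pvKeyOf gcs r) = true := by
            simpa [PySem.Dict.contains_iff_mem_keys] using hmem
          rw [PySem.Set.add_of_mem hmem]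
          have hg : ∃ m, D.get? (pvKeyOf gcs r) = some m := by
            rw [← Option.isSome_iff_exists, ← PySem.Dict.contains_eq_isSome_get?, hc]
          obtain ⟨m, hg⟩ := hg
          simp only [pvStepA, hg]
          split
          · exact PySem.Dict.keys_insert_of_contains _ _ hc
          · rfl
        · have hc : D.contains (pvKeyOf gcs r) = false := by
            rw [Bool.eq_false_iff]
            simp [PySem.Dict.contains_iff_mem_keys, hmem]
          have hg : D.get? (pvKeyOf gcs r) = none := by
            rw [PySem.Dict.get?_eq_none_iff_contains, hc]
          rw [PySem.Set.add_of_not_mem hmem]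
          simp only [pvStepA, hg]
          exact PySem.Dict.keys_insert_of_not_contains _ _ hc
      · -- get?
        intro k
        rw [pvVals_append]
        cases hg : D.get? (pvKeyOf gcs r) with
        | none =>
            have hm0 := hget (pvKeyOf gcs r)
            rw [hg] at hm0
            have hnil : pvVals agg gcs rows (pvKeyOf gcs r) = [] := by
              cases hv : pvVals agg gcs rows (pvKeyOf gcs r) with
              | nil => rfl
              | cons x t => rw [hv, PySem.List.max?_id_cons] at hm0; cases hm0
            simp only [pvStepA, hg]
            by_cases hk : k = pvKeyOf gcs r
            · subst hk
              rw [PySem.Dict.get?_insert_self, hnil]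
              simp [PySem.List.max?_id_cons]
            · rw [PySem.Dict.get?_insert_of_ne _ _ hk, hget]
              have hne : (pvKeyOf gcs r == k) = false := by simpa using fun h => hk h.symm
              simp [hne]
        | some m =>
            have hm : PySem.List.max? (pvVals agg gcs rows (pvKeyOf gcs r)) (fun y => y) = some m := by
              rw [← hget, hg]
            simp only [pvStepA, hg]
            by_cases hk : k = pvKeyOf gcs r
            · subst hk
              have hbt : (pvKeyOf gcs r == pvKeyOf gcs r) = true := by simp
              rw [if_pos hbt, pvMax?_append_singleton, hm]
              split_ifs with hv
              · rw [PySem.Dict.get?_insert_self]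
                congr 1
                exact (max_eq_right hv.le).symm
              · rw [hg]
                congr 1
                exact (max_eq_left (by omega)).symm
            · have hne : (pvKeyOf gcs r == k) = false := by simpa using fun h => hk h.symm
              simp only [hne, Bool.false_eq_true, if_false, List.append_nil]
              split_ifs
              · rw [PySem.Dict.get?_insert_of_ne _ _ hk, hget]
              · rw [hget]

def pvStepB (agg_column : Int) (group_columns : List Int) (d : PySem.Dict (List Int) (List Int)) (row : List Int) : PySem.Dict (List Int) (List Int) :=
  d.modify (pvKeyOf group_columns row) [] (fun vals => vals ++ [pvVOf agg_column row])

lemma pvRunB_getD (agg gcs : _) (rows : List (List Int)) (k : List Int) :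
    (rows.foldl (pvStepB agg gcs) PySem.Dict.empty).getD k [] = pvVals agg gcs rows k := by
  have h : rows.foldl (pvStepB agg gcs) PySem.Dict.empty
      = (rows.map (fun r => (pvKeyOf gcs r, pvVOf agg r))).foldl
          (fun d p => d.modify p.1 [] (fun vals => vals ++ [p.2])) PySem.Dict.empty := by
    rw [List.foldl_map]
    rfl
  rw [h, PySem.Dict.getD_foldl_modify_append, PySem.Dict.getD_empty]
  simp [pvVals, List.filter_map, Function.comp_def, List.map_map]

lemma pvRunB_keys (agg gcs : _) (rows : List (List Int)) :
    (rows.foldl (pvStepB agg gcs) PySem.Dict.empty).keys = PySem.Set.ofList (rows.map (pvKeyOf gcs)) := by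
  rw [show (rows.foldl (pvStepB agg gcs) PySem.Dict.empty)
      = rows.foldl (fun d x => d.modify (pvKeyOf gcs x) [] ((fun d x => (fun vals => vals ++ [pvVOf agg x])) d x)) PySem.Dict.empty from rfl,
    PySem.Dict.keys_foldl_modify_key]
  simp [PySem.Set.update_nil_left]


theorem pvEq (table : List (List Int)) (agg : Int) (gcs : List Int) :
    group_by_max table agg gcs = group_by_max_alt table agg gcs := by
  have hA : group_by_max table agg gcs
      = (table.foldl (pvStepA agg gcs) PySem.Dict.empty).keys.foldl
          (fun acc k => acc ++ [k ++ [(table.foldl (pvStepA agg gcs) PySem.Dict.empty).getD k 0]]) [] := rfl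
  have hB : group_by_max_alt table agg gcs
      = (table.foldl (pvStepB agg gcs) PySem.Dict.empty).items.map
          (fun p => p.1 ++ [(PySem.List.max? p.2 (fun y => y)).getD 0]) := rfl
  obtain ⟨hAkeys, hAget⟩ := pvRunA_char agg gcs table
  have hAnodup : (table.foldl (pvStepA agg gcs) PySem.Dict.empty).keys.Nodup := by
    rw [hAkeys]; exact PySem.Set.nodup_ofList _
  have hBnodup : (table.foldl (pvStepB agg gcs) PySem.Dict.empty).keys.Nodup := by
    rw [pvRunB_keys]; exact PySem.Set.nodup_ofList _
  rw [hA, hB, PySem.List.foldl_append_singleton_eq_map, List.nil_append,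
    PySem.Dict.items_eq_map_keys _ hBnodup [], List.map_map, pvRunB_keys, hAkeys]
  refine List.map_congr_left ?_
  intro k hk
  have hkmem : k ∈ table.map (pvKeyOf gcs) := (PySem.Set.mem_ofList _ _).mp hk
  have hvne : pvVals agg gcs table k ≠ [] := (pvMem_iff_vals_ne_nil agg gcs table k).mp hkmem
  have hAD : (table.foldl (pvStepA agg gcs) PySem.Dict.empty).getD k 0
      = (PySem.List.max? (pvVals agg gcs table k) (fun y => y)).getD 0 := by
    rw [PySem.Dict.getD_eq_get?_getD, hAget]
  rw [hAD, Function.comp_def]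
  dsimp only
  rw [pvRunB_getD]

-- ===== VERDICT (by name: the statement is the Claim_ definition above) =====
theorem group_by_max_spec : Claim_equal_group_by_max := by
  intro table agg gcs _ _
  unfold Spec_group_by_max
  exact pvEq table agg gcs
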